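-- pv_equiv track=rewrite | github.com/sps014/celestra | src/celestra/output/base_output.py | _group_resources_by_kind
-- ===== SOURCE A (Python) =====
-- from typing import Dict, List, Any, Optional, Union
--
-- def _group_resources_by_kind(resources: List[Dict[str, Any]]) -> Dict[str, List[Dict[str, Any]]]:
--     """
--     Group resources by their Kubernetes kind.
--
--     Args:
--         resources: List of Kubernetes resources
--
--     Returns:
--         Dict[str, List[Dict[str, Any]]]: Resources grouped by kind
--     """
--     groups = {}
--     for resource in resources:
--         kind = resource.get('kind', 'Unknown')
--         if kind not in groups:
--             groups[kind] = []
--         groups[kind].append(resource)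
--     return groups
-- ===== SOURCE B (Python) =====
-- def _group_resources_by_kind(resources):
--     """Two-pass grouping: collect distinct kinds in first-occurrence order,
--     then build each group by filtering the whole list once per kind."""
--     kinds = dict.fromkeys(r.get('kind', 'Unknown') for r in resources)
--     return {k: [r for r in resources if r.get('kind', 'Unknown') == k]
--             for k in kinds}
-- ===== Notes on version B (the rewrite author's own statement) =====
-- stated objective: alternative
-- what changed: Replaces the incremental dict-building single pass with a two-pass scheme: first dedup the kinds in first-occurrence order (dict.fromkeys), then build each group by filtering the whole resource list once per distinct kind.
import Mathlib
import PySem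

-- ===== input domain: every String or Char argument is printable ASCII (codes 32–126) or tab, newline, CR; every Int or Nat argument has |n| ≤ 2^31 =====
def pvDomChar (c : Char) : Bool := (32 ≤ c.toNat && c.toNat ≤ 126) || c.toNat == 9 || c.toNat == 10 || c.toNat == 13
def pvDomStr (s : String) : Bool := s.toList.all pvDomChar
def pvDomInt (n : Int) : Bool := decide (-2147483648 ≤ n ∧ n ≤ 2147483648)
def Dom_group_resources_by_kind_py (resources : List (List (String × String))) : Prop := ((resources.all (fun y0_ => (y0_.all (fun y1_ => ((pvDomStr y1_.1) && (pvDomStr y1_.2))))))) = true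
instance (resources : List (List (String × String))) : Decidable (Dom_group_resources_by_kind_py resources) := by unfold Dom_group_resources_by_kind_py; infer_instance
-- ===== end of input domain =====

-- B replaces A's incremental dict-building pass with dedup-the-kinds + one filter per distinct kind (alternative decomposition, same results).

-- resource.get('kind', 'Unknown')
def pvKind (r : List (String × String)) : String := (PySem.Dict.mk r).getD "kind" "Unknown"

-- ===== PORT A =====
def group_resources_by_kind_py (resources : List (List (String × String))) : List (String × List (List (String × String))) :=
  (resources.foldl (fun groups resource =>
      let kind := pvKind resource
      let groups := if groups.contains kind then groups else groups.insert kind []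
      groups.modify kind [] (fun l => l ++ [resource]))
    PySem.Dict.empty).items

-- ===== PORT B =====
def group_resources_by_kind_py_alt (resources : List (List (String × String))) : List (String × List (List (String × String))) :=
  (PySem.List.dedup (resources.map pvKind)).map
    (fun k => (k, resources.filter (fun r => pvKind r == k)))

-- ===== PRECONDITION & SPEC =====
def Spec_group_resources_by_kind_py (resources : List (List (String × String))) (out : List (String × List (List (String × String)))) : Prop := out = group_resources_by_kind_py_alt resources
instance (resources : List (List (String × String))) (out : List (String × List (List (String × String)))) : Decidable (Spec_group_resources_by_kind_py resources out) := by unfold Spec_group_resources_by_kind_py; infer_instance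

-- ===== CLAIM (what is proved, stated in full; the proofs are below) =====
def Claim_equal_group_resources_by_kind_py : Prop := ∀ (resources : List (List (String × String))), Dom_group_resources_by_kind_py resources → Spec_group_resources_by_kind_py resources (group_resources_by_kind_py resources)

-- ===== LEMMAS AND PROOFS =====

-- overwriting a just-inserted key is one insert
theorem insert_insert_self {κ ν : Type} [BEq κ] [LawfulBEq κ] (d : PySem.Dict κ ν) (k : κ) (v w : ν) :
    ((d.insert k v).insert k w) = d.insert k w := by
  apply PySem.Dict.ext
  by_cases h : d.contains k
  · rw [PySem.Dict.items_insert_of_contains _ _ h,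
        PySem.Dict.items_insert_of_contains _ _ (by simp),
        PySem.Dict.items_insert_of_contains _ _ h]
    rw [List.map_map]
    apply List.map_congr_left; intro p _
    by_cases hp : p.1 == k <;> simp [hp]
  · rw [PySem.Dict.items_insert_of_not_contains _ _ (eq_false_of_ne_true h),
        PySem.Dict.items_insert_of_contains _ _ (by simp),
        PySem.Dict.items_insert_of_not_contains _ _ (eq_false_of_ne_true h)]
    rw [List.map_append]
    congr 1
    · conv_rhs => rw [← List.map_id d.items]
      apply List.map_congr_left; intro p hp
      have : p.1 ≠ k := by
        intro hk
        exact h ((PySem.Dict.contains_iff_mem_keys d k).2 (hk ▸ PySem.Dict.mem_keys_of_mem_items d hp))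
      simp [this]
    · simp

-- A's "insert [] if missing, then append" body IS 'modify k [] (· ++ [r])'
theorem step_eq (d : PySem.Dict String (List (List (String × String)))) (k : String) (r : List (String × String)) :
    ((if d.contains k then d else d.insert k []).modify k [] (fun l => l ++ [r])) = d.modify k [] (fun l => l ++ [r]) := by
  by_cases h : d.contains k
  · simp [h]
  · simp only [h, Bool.false_eq_true, ite_false]
    unfold PySem.Dict.modify
    rw [PySem.Dict.getD_insert_self, insert_insert_self,
        PySem.Dict.getD_of_not_contains _ _ (eq_false_of_ne_true h)]

-- a dict with distinct keys is its key list paired with its lookups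
theorem items_eq_map_keys {κ : Type} [BEq κ] [LawfulBEq κ] {ν : Type}
    (d : PySem.Dict κ (List ν)) (h : d.keys.Nodup) :
    d.items = d.keys.map (fun k => (k, d.getD k [])) := by
  have hk : d.keys = d.items.map (·.1) := by simp only [PySem.Dict.keys]
  rw [hk, List.map_map]
  conv_lhs => rw [← List.map_id d.items]
  apply List.map_congr_left; intro p hp
  obtain ⟨k, v⟩ := p
  simp [PySem.Dict.getD_of_mem_items d hp h]

theorem main_eq (resources : List (List (String × String))) :
    group_resources_by_kind_py resources = group_resources_by_kind_py_alt resources := by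
  unfold group_resources_by_kind_py group_resources_by_kind_py_alt
  have hfun : (fun (groups : PySem.Dict String (List (List (String × String)))) resource =>
      let kind := pvKind resource
      let groups := if groups.contains kind then groups else groups.insert kind []
      groups.modify kind [] (fun l => l ++ [resource])) =
      (fun d r => d.modify (pvKind r) [] (fun l => l ++ [r])) := by
    funext d r; exact step_eq d (pvKind r) r
  rw [hfun]
  set D := resources.foldl (fun d r => d.modify (pvKind r) [] (fun l => l ++ [r])) PySem.Dict.empty with hD
  have hkeys : D.keys = PySem.List.dedup (resources.map pvKind) := by
    rw [hD, PySem.Dict.keys_foldl_modify_key resources pvKind [] (fun _ r v => v ++ [r]),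
        PySem.Dict.keys_empty, PySem.Set.update_nil_left, PySem.List.dedup_eq_ofList]
  have hnodup : D.keys.Nodup := by
    rw [hD]
    exact PySem.Dict.nodup_keys_foldl_modify_key resources pvKind [] (fun _ r v => v ++ [r]) _ PySem.Dict.nodup_keys_empty
  have hgetD : ∀ c, D.getD c [] = resources.filter (fun r => pvKind r == c) := by
    intro c
    have hm : resources.foldl (fun d r => d.modify (pvKind r) [] (fun l => l ++ [r])) PySem.Dict.empty
        = (resources.map (fun r => (pvKind r, r))).foldl (fun d p => d.modify p.1 [] (fun l => l ++ [p.2])) PySem.Dict.empty := by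
      rw [List.foldl_map]
    rw [hD, hm, PySem.Dict.getD_foldl_modify_append]
    rw [List.filter_map, List.map_map]
    simp only [PySem.Dict.getD_empty, List.nil_append, Function.comp_def]
    rw [List.map_id']
  rw [items_eq_map_keys D hnodup, hkeys]
  apply List.map_congr_left; intro k _
  rw [hgetD]

-- ===== VERDICT (by name: the statement is the Claim_ definition above) =====
theorem group_resources_by_kind_py_spec : Claim_equal_group_resources_by_kind_py := by
  intro resources _
  unfold Spec_group_resources_by_kind_py
  exact main_eq resources
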